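-- pv_equiv track=rewrite | github.com/unstoppable95/RozpoznawanieTablicRejestracyjnych | ProjektKCK.py | czy_pozioma
-- ===== SOURCE A (Python) =====
-- def czy_pozioma(tablica): # sprawdza czy przypuszczalna tablica nie jest pionowa
--     tablica_x = []
--     tablica_y = []
--     for i in tablica:
--         tablica_x.append(i[0])
--         tablica_y.append(i[1])
--
--     min_x = min(tablica_x)
--     max_x = max(tablica_x)
--     min_y = min(tablica_y)
--     max_y = max(tablica_y)
--
--     odl_x = max_x - min_x
--     odl_y = max_y - min_y
--
--     if odl_x > odl_y:
--         return 1
--     else: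
--         return 0
-- ===== SOURCE B (Python) =====
-- def czy_pozioma(tablica):
--     xs = sorted(p[0] for p in tablica)
--     ys = sorted(p[1] for p in tablica)
--     return 1 if xs[-1] - xs[0] > ys[-1] - ys[0] else 0
-- ===== Notes on version B (the rewrite author's own statement) =====
-- stated objective: alternative
-- what changed: B sorts the x- and y-coordinates and reads each range off the ends of the sorted lists (first/last element), instead of A's append-loop building two lists and four min/max scans.
import Mathlib
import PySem

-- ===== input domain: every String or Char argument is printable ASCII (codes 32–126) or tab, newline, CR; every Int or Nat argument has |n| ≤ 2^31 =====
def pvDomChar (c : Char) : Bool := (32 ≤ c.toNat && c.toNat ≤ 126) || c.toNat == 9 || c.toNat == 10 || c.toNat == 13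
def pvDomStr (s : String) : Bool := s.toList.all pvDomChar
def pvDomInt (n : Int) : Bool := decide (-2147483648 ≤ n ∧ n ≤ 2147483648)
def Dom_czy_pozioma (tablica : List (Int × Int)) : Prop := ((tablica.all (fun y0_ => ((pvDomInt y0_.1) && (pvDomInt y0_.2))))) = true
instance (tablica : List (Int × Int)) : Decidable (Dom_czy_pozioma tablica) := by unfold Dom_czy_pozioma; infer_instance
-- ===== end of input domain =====

-- B sorts each coordinate list and reads the range off its ends instead of A's
-- append-loop plus four min/max scans (objective: alternative algorithm).

-- ===== PORT A =====
def czy_pozioma (tablica : List (Int × Int)) : Int :=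
  -- the append-loop building tablica_x / tablica_y, then min/max (none = ValueError, excluded by Pre_)
  let tablica_x := tablica.foldl (fun acc i => acc ++ [i.1]) []
  let tablica_y := tablica.foldl (fun acc i => acc ++ [i.2]) []
  match PySem.List.min? tablica_x (fun v => v), PySem.List.max? tablica_x (fun v => v),
        PySem.List.min? tablica_y (fun v => v), PySem.List.max? tablica_y (fun v => v) with
  | some min_x, some max_x, some min_y, some max_y =>
      let odl_x := max_x - min_x
      let odl_y := max_y - min_y
      if odl_x > odl_y then 1 else 0
  | _, _, _, _ => 0   -- unreachable under Pre_ (Python raises ValueError on [])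

-- ===== PORT B =====
def czy_pozioma_alt (tablica : List (Int × Int)) : Int :=
  let xs := PySem.List.sorted (tablica.map (fun p => p.1)) (fun v => v) false
  let ys := PySem.List.sorted (tablica.map (fun p => p.2)) (fun v => v) false
  match (PySem.List.pyGet? xs (-1)).bind (fun xl =>
        (PySem.List.pyGet? xs 0).bind (fun xf =>
        (PySem.List.pyGet? ys (-1)).bind (fun yl =>
        (PySem.List.pyGet? ys 0).map (fun yf => (xl, xf, yl, yf))))) with
  | some (xl, xf, yl, yf) => if xl - xf > yl - yf then 1 else 0
  | none => 0   -- unreachable under Pre_ (Python raises IndexError on [])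

-- ===== PRECONDITION & SPEC =====
-- Pre_ excludes only the empty list, on which Python A raises ValueError (and B IndexError).
def Pre_czy_pozioma (tablica : List (Int × Int)) : Prop := tablica ≠ []
instance (tablica : List (Int × Int)) : Decidable (Pre_czy_pozioma tablica) := by
  unfold Pre_czy_pozioma; infer_instance
def pvWitness_czy_pozioma : (List (Int × Int)) := [(0, 0), (3, 1)]
def Spec_czy_pozioma (tablica : List (Int × Int)) (out : Int) : Prop := out = czy_pozioma_alt tablica
instance (tablica : List (Int × Int)) (out : Int) : Decidable (Spec_czy_pozioma tablica out) := by unfold Spec_czy_pozioma; infer_instance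

-- ===== CLAIM (what is proved, stated in full; the proofs are below) =====
def Claim_equal_czy_pozioma : Prop := ∀ (tablica : List (Int × Int)), Dom_czy_pozioma tablica → Pre_czy_pozioma tablica → Spec_czy_pozioma tablica (czy_pozioma tablica)

-- ===== LEMMAS AND PROOFS =====

theorem foldl_append_fst (tablica : List (Int × Int)) (acc : List Int) :
    tablica.foldl (fun acc i => acc ++ [i.1]) acc = acc ++ tablica.map Prod.fst := by
  induction tablica generalizing acc with
  | nil => simp
  | cons h t ih => simp [List.foldl, ih]

theorem foldl_append_snd (tablica : List (Int × Int)) (acc : List Int) :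
    tablica.foldl (fun acc i => acc ++ [i.2]) acc = acc ++ tablica.map Prod.snd := by
  induction tablica generalizing acc with
  | nil => simp
  | cons h t ih => simp [List.foldl, ih]

-- the first element of sorted(l) is min(l)
theorem sorted_head_min (l : List Int) (hne : l ≠ []) :
    (PySem.List.sorted l (fun v => v) false).head? = PySem.List.min? l (fun v => v) := by
  cases hs : PySem.List.sorted l (fun v => v) false with
  | nil => exact absurd ((PySem.List.sorted_eq_nil_iff l _ false).1 hs) hne
  | cons m t =>
    have hm : m ∈ l := (PySem.List.mem_sorted l _ false m).1 (hs ▸ List.mem_cons_self)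
    cases hmin : PySem.List.min? l (fun v => v) with
    | none => exact absurd ((PySem.List.min?_eq_none_iff l _).1 hmin) hne
    | some m' =>
      have h1 : m ≤ m' := PySem.List.key_head_sorted_le l (fun v => v) hs m' (PySem.List.min?_mem hmin)
      have h2 : m' ≤ m := PySem.List.min?_isMin hmin m hm
      simp [le_antisymm h1 h2]

-- the last element of sorted(l) is max(l)
theorem sorted_last_max (l : List Int) (hne : l ≠ []) :
    (PySem.List.sorted l (fun v => v) false).getLast? = PySem.List.max? l (fun v => v) := by
  have hsne : PySem.List.sorted l (fun v => v) false ≠ [] := by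
    simpa [PySem.List.sorted_eq_nil_iff] using hne
  have hlen : 0 < (PySem.List.sorted l (fun v => v) false).length :=
    List.length_pos_iff.2 hsne
  set s := PySem.List.sorted l (fun v => v) false with hsdef
  have hlast : s.getLast? = some (s[s.length - 1]'(by omega)) := by
    rw [List.getLast?_eq_getElem?]
    exact List.getElem?_eq_getElem _
  have hmem : s[s.length - 1]'(by omega) ∈ l := by
    rw [← PySem.List.mem_sorted l (fun v => v) false]
    exact List.getElem_mem _
  cases hmax : PySem.List.max? l (fun v => v) with
  | none => exact absurd ((PySem.List.max?_eq_none_iff l _).1 hmax) hne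
  | some m' =>
    have h1 : s[s.length - 1]'(by omega) ≤ m' :=
      PySem.List.max?_isMax hmax _ hmem
    have hm'mem : m' ∈ s := by
      rw [hsdef, PySem.List.mem_sorted]
      exact PySem.List.max?_mem hmax
    obtain ⟨p, hp, hpe⟩ := List.getElem_of_mem hm'mem
    have h2 : m' ≤ s[s.length - 1]'(by omega) := by
      have := PySem.List.key_sorted_getElem_mono l (fun v => v)
        (p := p) (q := s.length - 1) (by omega) (by simpa [← hsdef] using (by omega : s.length - 1 < s.length))
      simpa [← hsdef, hpe] using this
    rw [hlast, le_antisymm h1 h2]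

theorem pyGet?_zero (l : List Int) (hne : l ≠ []) :
    PySem.List.pyGet? l 0 = l.head? := by
  have : 0 < l.length := List.length_pos_iff.2 hne
  cases l with
  | nil => simp at this
  | cons a t => simp [PySem.List.pyGet?, PySem.List.pyIdx?]

theorem pyGet?_neg_one (l : List Int) (hne : l ≠ []) :
    PySem.List.pyGet? l (-1) = l.getLast? := by
  have hl : 0 < l.length := List.length_pos_iff.2 hne
  have h1 : -(l.length : Int) ≤ -1 := by omega
  simp only [PySem.List.pyGet?, PySem.List.pyIdx?]
  rw [if_neg (by omega), if_pos h1]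
  simp only [Option.bind_some, List.getLast?_eq_getElem?]
  norm_num

-- ===== VERDICT =====
theorem czy_pozioma_spec : Claim_equal_czy_pozioma := by
  intro tablica _ hpre
  unfold Spec_czy_pozioma czy_pozioma czy_pozioma_alt
  have hx : tablica.map Prod.fst ≠ [] := by simpa using hpre
  have hy : tablica.map Prod.snd ≠ [] := by simpa using hpre
  have hxs : PySem.List.sorted (tablica.map Prod.fst) (fun v => v) false ≠ [] := by
    simpa [PySem.List.sorted_eq_nil_iff] using hx
  have hys : PySem.List.sorted (tablica.map Prod.snd) (fun v => v) false ≠ [] := by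
    simpa [PySem.List.sorted_eq_nil_iff] using hy
  simp only [foldl_append_fst, foldl_append_snd, List.nil_append,
    pyGet?_zero _ hxs, pyGet?_neg_one _ hxs, pyGet?_zero _ hys, pyGet?_neg_one _ hys,
    sorted_head_min _ hx, sorted_last_max _ hx, sorted_head_min _ hy, sorted_last_max _ hy]
  cases hminx : PySem.List.min? (tablica.map Prod.fst) (fun v => v) with
  | none => exact absurd ((PySem.List.min?_eq_none_iff _ _).1 hminx) hx
  | some a =>
  cases hmaxx : PySem.List.max? (tablica.map Prod.fst) (fun v => v) with
  | none => exact absurd ((PySem.List.max?_eq_none_iff _ _).1 hmaxx) hx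
  | some b =>
  cases hminy : PySem.List.min? (tablica.map Prod.snd) (fun v => v) with
  | none => exact absurd ((PySem.List.min?_eq_none_iff _ _).1 hminy) hy
  | some c =>
  cases hmaxy : PySem.List.max? (tablica.map Prod.snd) (fun v => v) with
  | none => exact absurd ((PySem.List.max?_eq_none_iff _ _).1 hmaxy) hy
  | some d => rfl
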